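-- pv_equiv track=rewrite | github.com/zita-ch/Homework_in_tsinghua | 大二下辅修信息检索技术/第二次大作业/ini_and_func.py | generate_bigram
-- ===== SOURCE A (Python) =====
-- def generate_bigram(w):
--     ans=[]
--     w_len=len(w)
--     ans.append('$'+w[0])
--     for i in range(w_len-1):
--         ans.append(w[i:i+2])
--     ans.append(w[-1]+"$")
--     return ans
-- ===== SOURCE B (Python) =====
-- def generate_bigram(w):
--     # Carried-state scan: fold over the characters keeping the previous
--     # symbol (initially the '$' boundary marker); emit prev+current at each
--     # step and close with prev+'$'. No indexing or slicing anywhere.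
--     ans = []
--     prev = '$'
--     for c in w:
--         ans.append(prev + c)
--         prev = c
--     ans.append(prev + '$')
--     return ans
-- ===== Notes on version B (the rewrite author's own statement) =====
-- stated objective: alternative
-- what changed: B is a carried-state scan: it folds over the characters keeping the previous symbol (initialised to '$'), emitting prev+current at each step and closing with prev+'$', with no indexing or slicing, instead of A's index-based loop of w[i:i+2] slices stitched between explicit '$'+w[0] and w[-1]+'$' appends.
import Mathlib
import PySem

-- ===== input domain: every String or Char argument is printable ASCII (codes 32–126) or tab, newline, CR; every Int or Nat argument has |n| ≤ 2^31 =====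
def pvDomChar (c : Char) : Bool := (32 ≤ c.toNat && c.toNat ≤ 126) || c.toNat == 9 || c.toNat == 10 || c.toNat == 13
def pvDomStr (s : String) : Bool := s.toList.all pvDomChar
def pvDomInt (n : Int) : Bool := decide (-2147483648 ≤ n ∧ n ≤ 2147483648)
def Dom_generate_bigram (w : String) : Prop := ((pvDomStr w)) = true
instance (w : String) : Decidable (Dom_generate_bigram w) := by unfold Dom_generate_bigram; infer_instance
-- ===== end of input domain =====

-- B replaces A's indexed loop with explicit prefix/suffix appends by a carried-state
-- scan over the characters holding the previous symbol (objective: alternative decomposition).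

-- ===== PORT A =====
-- transliteration of A; w[i:i+2] for 0 ≤ i is (drop i).take 2, w[0]/w[-1] are head/last
-- (the getD defaults are unreachable under Pre_, where w is nonempty)
def generate_bigram (w : String) : List String :=
  let cs := w.toList
  let w_len := cs.length
  let ans : List String := [String.ofList ['$', cs.head?.getD '?']]          -- ans.append('$'+w[0])
  let ans := (List.range (w_len - 1)).foldl
      (fun a i => a ++ [String.ofList ((cs.drop i).take 2)]) ans             -- ans.append(w[i:i+2])
  ans ++ [String.ofList [cs.getLast?.getD '?', '$']]                         -- ans.append(w[-1]+'$')

-- ===== PORT B =====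
-- transliteration of B: fold over the characters carrying (ans, prev), then close with prev+'$'
def generate_bigram_alt (w : String) : List String :=
  let st := w.toList.foldl
      (fun (p : List String × Char) c => (p.1 ++ [String.ofList [p.2, c]], c)) ([], '$')
  st.1 ++ [String.ofList [st.2, '$']]

-- ===== PRECONDITION & SPEC =====
-- Pre_ excludes only the empty string, on which A raises IndexError at w[0]
def Pre_generate_bigram (w : String) : Prop := w ≠ ""
instance (w : String) : Decidable (Pre_generate_bigram w) := by unfold Pre_generate_bigram; infer_instance
def pvWitness_generate_bigram : String := "ab"

def Spec_generate_bigram (w : String) (out : List String) : Prop := out = generate_bigram_alt w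
instance (w : String) (out : List String) : Decidable (Spec_generate_bigram w out) := by unfold Spec_generate_bigram; infer_instance

-- ===== CLAIM (what is proved, stated in full; the proofs are below) =====
def Claim_equal_generate_bigram : Prop := ∀ (w : String), Dom_generate_bigram w → Pre_generate_bigram w → Spec_generate_bigram w (generate_bigram w)

-- ===== LEMMAS AND PROOFS =====

-- recursive view of B's carried-state scan, used only in the proofs
def pvRec (prev : Char) : List Char → List String
  | [] => [String.ofList [prev, '$']]
  | c :: t => String.ofList [prev, c] :: pvRec c t

theorem pvFoldlRec (t : List Char) (acc : List String) (prev : Char) :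
    (t.foldl (fun (p : List String × Char) c => (p.1 ++ [String.ofList [p.2, c]], c)) (acc, prev)).1
      ++ [String.ofList [(t.foldl (fun (p : List String × Char) c => (p.1 ++ [String.ofList [p.2, c]], c)) (acc, prev)).2, '$']]
    = acc ++ pvRec prev t := by
  induction t generalizing acc prev with
  | nil => simp [pvRec]
  | cons c u ih => simp [List.foldl, pvRec, ih (acc ++ [String.ofList [prev, c]]) c]

-- recursive view of A's interior sliding windows, used only in the proofs
def pvWin : List Char → List String
  | a :: b :: t => String.ofList [a, b] :: pvWin (b :: t)
  | _ => []

theorem pvFoldlPush (f : Nat → String) (l : List Nat) (init : List String) :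
    l.foldl (fun a i => a ++ [f i]) init = init ++ l.map f := by
  induction l generalizing init with
  | nil => simp
  | cons x xs ih => simp [List.foldl, ih]

theorem pvMapRangeEqWin (s : List Char) :
    (List.range (s.length - 1)).map (fun i => String.ofList ((s.drop i).take 2)) = pvWin s := by
  induction s with
  | nil => simp [pvWin]
  | cons a t iht =>
    cases t with
    | nil => simp [pvWin]
    | cons b u =>
      have h : (a :: b :: u).length - 1 = ((b :: u).length - 1) + 1 := by simp
      rw [h, List.range_succ_eq_map, List.map_cons, List.map_map]
      simp only [List.drop, List.take]
      exact congrArg (String.ofList [a, b] :: ·) (by simpa [Function.comp] using iht)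

-- B's recursion equals A's interior windows followed by the last+'$' bigram
theorem pvRecEq (c : Char) (t : List Char) :
    pvRec c t = pvWin (c :: t) ++ [String.ofList [(c :: t).getLast?.getD '?', '$']] := by
  induction t generalizing c with
  | nil => simp [pvRec, pvWin]
  | cons d u ih => simp [pvRec, pvWin, ih d]

theorem generate_bigram_eq (c : Char) (rest : List Char) (w : String) (hw : w.toList = c :: rest) :
    generate_bigram w = generate_bigram_alt w := by
  unfold generate_bigram generate_bigram_alt
  rw [hw]
  simp only [pvFoldlPush, pvMapRangeEqWin]
  rw [pvFoldlRec (c :: rest) [] '$']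
  simp only [pvRec, pvRecEq, List.nil_append]
  simp

-- ===== VERDICT (by name: the statement is the Claim_ definition above) =====
theorem generate_bigram_spec : Claim_equal_generate_bigram := by
  intro w _ hpre
  unfold Spec_generate_bigram
  cases hcs : w.toList with
  | nil => exact absurd (String.toList_eq_nil_iff.mp hcs) hpre
  | cons c rest => exact generate_bigram_eq c rest w hcs
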